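-- pv_equiv track=rewrite | github.com/b-chae/AlgorithmStudy | programmers/210912.py | solve4
-- ===== SOURCE A (Python) =====
-- def solve4(n, info, arrow, score):
--
--   arrow = list(arrow)
--
--   if sum(arrow) > n:
--     return -1000000, [0,0,0,0,0,0,0,0,0,0,0]
--
--   if score > 10:
--     return 0, tuple(arrow)
--
--   origin = arrow[score]
--   arrow[score] += info[score]+1
--   total1, res1 = solve4(n, info, tuple(arrow), score+1)
--   if total1 != -1000000:
--     total1 += 10-score
--
--   arrow[score] = origin
--   total2, res2 = solve4(n, info, tuple(arrow), score+1)
--   if total2 != -1000000: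
--     if info[score]>0:
--       total2 -= 10-score
--
--   if total1 == -1000000 and total2 == -1000000:
--     return -1000000, [0,0,0,0,0,0,0,0,0,0,0]
--   if total1 > total2:
--     return total1, res1
--   return total2, res2
-- ===== SOURCE B (Python) =====
-- def solve4(n, info, arrow, score):
--     arrow = list(arrow)
--     if sum(arrow) > n:
--         return -1000000, [0, 0, 0, 0, 0, 0, 0, 0, 0, 0, 0]
--     k = 11 - score if score < 11 else 0
--     best = None
--     for m in range(1 << k):
--         cand = list(arrow)
--         diff = 0
--         for j in range(k):
--             i = score + j
--             if (m >> (k - 1 - j)) & 1: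
--                 cand[i] += info[i] + 1
--                 diff += 10 - i
--             elif info[i] > 0:
--                 diff -= 10 - i
--         if sum(cand) <= n and (best is None or diff > best[0]):
--             best = (diff, tuple(cand))
--     if best is None:
--         return -1000000, [0, 0, 0, 0, 0, 0, 0, 0, 0, 0, 0]
--     return best
-- ===== Notes on version B (the rewrite author's own statement) =====
-- stated objective: alternative
-- what changed: Replaces A's branching recursion (with sentinel propagation and per-level score adjustment) by a flat iterative enumeration of all 2^(11-score) bitmasks, scoring each complete candidate arrow vector in one inner pass and keeping the best with A's skip-preferring tie order (ascending masks, strict improvement).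
import Mathlib
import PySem

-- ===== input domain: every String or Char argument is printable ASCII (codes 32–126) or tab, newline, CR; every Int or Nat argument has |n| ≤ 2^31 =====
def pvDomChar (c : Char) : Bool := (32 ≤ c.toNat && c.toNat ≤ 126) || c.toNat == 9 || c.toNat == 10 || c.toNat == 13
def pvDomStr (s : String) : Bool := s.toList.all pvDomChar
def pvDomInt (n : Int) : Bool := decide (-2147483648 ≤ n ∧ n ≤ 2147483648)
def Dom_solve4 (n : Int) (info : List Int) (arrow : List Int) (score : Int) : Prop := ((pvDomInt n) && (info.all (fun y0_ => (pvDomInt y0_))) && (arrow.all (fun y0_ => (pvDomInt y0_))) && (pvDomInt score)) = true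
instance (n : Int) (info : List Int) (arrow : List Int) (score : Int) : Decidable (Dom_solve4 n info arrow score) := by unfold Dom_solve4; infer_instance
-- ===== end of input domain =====

-- B replaces A's branching recursion by a flat bitmask enumeration of all candidate arrow
-- vectors (objective: alternative); return-value equivalence is proved on Pre_solve4 below.

-- ===== PORT A =====
-- literal transliteration of A; indexing/assignment via PySem pyGetD/pySetD (Python raises
-- on out-of-range indices: those inputs are outside Pre_solve4, where getD/setD defaults are unused)
def solve4 (n : Int) (info : List Int) (arrow : List Int) (score : Int) : Int × List Int :=
  if arrow.sum > n then (-1000000, [0,0,0,0,0,0,0,0,0,0,0])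
  else if score > 10 then (0, arrow)
  else
    let origin := PySem.List.pyGetD arrow score 0
    let inf := PySem.List.pyGetD info score 0
    let arrow1 := PySem.List.pySetD arrow score (origin + inf + 1)
    let r1 := solve4 n info arrow1 (score + 1)
    let total1 := if r1.1 ≠ -1000000 then r1.1 + (10 - score) else r1.1
    let r2 := solve4 n info arrow (score + 1)
    let total2 := if r2.1 ≠ -1000000 then (if inf > 0 then r2.1 - (10 - score) else r2.1) else r2.1
    if total1 = -1000000 ∧ total2 = -1000000 then (-1000000, [0,0,0,0,0,0,0,0,0,0,0])
    else if total1 > total2 then (total1, r1.2) else (total2, r2.2)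
termination_by (11 - score).toNat
decreasing_by all_goals omega

-- ===== PORT B =====
-- literal transliteration of Source B; `1 << k` is 2 ^ k.toNat (k ≥ 0 here) and
-- `(m >> (k-1-j)) & 1` is floordiv by that power of two followed by mod 2 (exact for m ≥ 0)
def solve4_alt (n : Int) (info : List Int) (arrow : List Int) (score : Int) : Int × List Int :=
  if arrow.sum > n then (-1000000, [0,0,0,0,0,0,0,0,0,0,0])
  else
    let k : Int := if score < 11 then 11 - score else 0
    let best := (PySem.List.pyRange 0 (2 ^ k.toNat) 1).foldl (fun best m =>
        let cd := (PySem.List.pyRange 0 k 1).foldl (fun cd j =>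
            let i := score + j
            if PySem.Int.mod (PySem.Int.floordiv m (2 ^ (k - 1 - j).toNat)) 2 = 1 then
              (PySem.List.pySetD cd.1 i (PySem.List.pyGetD cd.1 i 0 + PySem.List.pyGetD info i 0 + 1),
               cd.2 + (10 - i))
            else if PySem.List.pyGetD info i 0 > 0 then (cd.1, cd.2 - (10 - i))
            else cd) (arrow, (0 : Int))
        if cd.1.sum ≤ n ∧ (best = none ∨ cd.2 > (best.getD (0, ([] : List Int))).1) then
          some (cd.2, cd.1)
        else best)
      (none : Option (Int × List Int))
    match best with
    | none => (-1000000, [0,0,0,0,0,0,0,0,0,0,0])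
    | some b => b

-- ===== PRECONDITION & SPEC =====
-- Pre_ keeps the problem's natural domain: either one of A's two input-independent early
-- returns fires, or score is a nonnegative position, both lists have the 11 archery slots,
-- and the info arrow counts are nonnegative.  Excluded while A still returns: negative score
-- (Python negative-index wraparound) and negative info counts (A's entry-time prefix pruning
-- is then an accident of its traversal); excluded where A raises: lists shorter than 11.
def Pre_solve4 (n : Int) (info : List Int) (arrow : List Int) (score : Int) : Prop :=
  arrow.sum > n ∨ score > 10 ∨
    (0 ≤ score ∧ 11 ≤ info.length ∧ 11 ≤ arrow.length ∧ ∀ x ∈ info, 0 ≤ x)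
instance (n : Int) (info : List Int) (arrow : List Int) (score : Int) : Decidable (Pre_solve4 n info arrow score) := by unfold Pre_solve4; infer_instance

def pvWitness_solve4 : Int × List Int × List Int × Int :=
  (3, [0,0,0,0,0,0,0,0,0,0,0], [0,0,0,0,0,0,0,0,0,0,0], 0)

def Spec_solve4 (n : Int) (info : List Int) (arrow : List Int) (score : Int) (out : Int × List Int) : Prop := out = solve4_alt n info arrow score
instance (n : Int) (info : List Int) (arrow : List Int) (score : Int) (out : Int × List Int) : Decidable (Spec_solve4 n info arrow score out) := by unfold Spec_solve4; infer_instance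

-- ===== CLAIM (what is proved, stated in full; the proofs are below) =====
def Claim_equal_solve4 : Prop := ∀ (n : Int) (info : List Int) (arrow : List Int) (score : Int), Dom_solve4 n info arrow score → Pre_solve4 n info arrow score → Spec_solve4 n info arrow score (solve4 n info arrow score)

-- ===== LEMMAS AND PROOFS =====

-- the sentinel pair both programs use for "no feasible assignment"
def pvSent : Int × List Int := (-1000000, [0,0,0,0,0,0,0,0,0,0,0])

-- "keep the earlier value unless the later is strictly better" (A's tie rule)
def pvComb (a x : Int × List Int) : Int × List Int := if x.1 > a.1 then x else a

def pvBest (l : List (Int × List Int)) : Int × List Int := l.foldl pvComb pvSent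

-- all choice vectors of length k, skip(false)-first (A's exploration order, msb-first masks)
def pvVecs : Nat → List (List Bool)
  | 0 => [[]]
  | k+1 => (pvVecs k).map (fun bs => false :: bs) ++ (pvVecs k).map (fun bs => true :: bs)

-- the candidate arrow vector a choice list produces, starting at position s
def pvApply (info : List Int) : Int → List Int → List Bool → List Int
  | _, ar, [] => ar
  | s, ar, b :: bs =>
      pvApply info (s+1)
        (if b then PySem.List.pySetD ar s (PySem.List.pyGetD ar s 0 + PySem.List.pyGetD info s 0 + 1) else ar) bs

-- the signed score difference of a choice list
def pvDiff (info : List Int) : Int → List Bool → Int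
  | _, [] => 0
  | s, b :: bs =>
      (if b then 10 - s else if PySem.List.pyGetD info s 0 > 0 then -(10 - s) else 0) + pvDiff info (s+1) bs

-- the value A/B associate to one complete choice list
def pvVal (n : Int) (info : List Int) (s : Int) (ar : List Int) (bs : List Bool) : Int × List Int :=
  if (pvApply info s ar bs).sum > n then pvSent else (pvDiff info s bs, pvApply info s ar bs)

-- A's per-level total adjustment
def pvAdj (c : Int) (x : Int × List Int) : Int × List Int :=
  if x.1 ≠ -1000000 then (x.1 + c, x.2) else x

-- msb-first bit list of a mask
def pvBits : Nat → Int → List Bool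
  | 0, _ => []
  | k+1, m => (PySem.Int.mod (PySem.Int.floordiv m (2 ^ k)) 2 = 1) :: pvBits k m

def pvGood (x : Int × List Int) : Prop := x = pvSent ∨ -1000000 < x.1

theorem pvGood_comb {a x : Int × List Int} (ha : pvGood a) (hx : pvGood x) : pvGood (pvComb a x) := by
  unfold pvComb; split <;> assumption

theorem pvComb_sent_left {x : Int × List Int} (hx : pvGood x) : pvComb pvSent x = x := by
  rcases hx with h | h
  · subst h; simp [pvComb]
  · unfold pvComb pvSent; rw [if_pos]; simpa using h

theorem pvComb_sent_right {a : Int × List Int} (ha : pvGood a) : pvComb a pvSent = a := by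
  rcases ha with h | h
  · subst h; simp [pvComb]
  · unfold pvComb pvSent; rw [if_neg]; simp; omega

theorem pvComb_assoc {a x y : Int × List Int} : pvComb (pvComb a x) y = pvComb a (pvComb x y) := by
  unfold pvComb; split_ifs <;> first | rfl | omega

theorem pvGood_foldl {l : List (Int × List Int)} :
    ∀ b : Int × List Int, (∀ x ∈ l, pvGood x) → pvGood b → pvGood (l.foldl pvComb b) := by
  induction l with
  | nil => intro b _ hb; simpa using hb
  | cons x t ih =>
      intro b h hb
      exact ih _ (fun y hy => h y (List.mem_cons_of_mem _ hy))
        (pvGood_comb hb (h x (List.mem_cons_self)))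

theorem pvGood_best {l : List (Int × List Int)} (h : ∀ x ∈ l, pvGood x) : pvGood (pvBest l) := by
  exact pvGood_foldl pvSent h (Or.inl rfl)

-- fold with an arbitrary Good seed = pvComb of the seed with pvBest
theorem pvFold_split {l : List (Int × List Int)} (h : ∀ x ∈ l, pvGood x) :
    ∀ b : Int × List Int, pvGood b → l.foldl pvComb b = pvComb b (pvBest l) := by
  revert h
  induction l with
  | nil => intro _ b hb; simp [pvBest, List.foldl]; exact (pvComb_sent_right hb).symm
  | cons x t ih =>
      intro h b hb
      have hx := h x List.mem_cons_self
      have ht : ∀ y ∈ t, pvGood y := fun y hy => h y (List.mem_cons_of_mem _ hy)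
      have hbx : pvGood (pvComb b x) := pvGood_comb hb hx
      calc (x :: t).foldl pvComb b = t.foldl pvComb (pvComb b x) := rfl
        _ = pvComb (pvComb b x) (pvBest t) := ih ht _ hbx
        _ = pvComb b (pvComb x (pvBest t)) := pvComb_assoc
        _ = pvComb b (t.foldl pvComb x) := by rw [ih ht x hx]
        _ = pvComb b (t.foldl pvComb (pvComb pvSent x)) := by rw [pvComb_sent_left hx]
        _ = pvComb b (pvBest (x :: t)) := rfl

theorem pvBest_append {l₁ l₂ : List (Int × List Int)} (h₁ : ∀ x ∈ l₁, pvGood x)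
    (h₂ : ∀ x ∈ l₂, pvGood x) : pvBest (l₁ ++ l₂) = pvComb (pvBest l₁) (pvBest l₂) := by
  unfold pvBest
  rw [List.foldl_append]
  exact pvFold_split h₂ _ (pvGood_best h₁)

theorem pvBest_all_sent {l : List (Int × List Int)} (h : ∀ x ∈ l, x = pvSent) :
    pvBest l = pvSent := by
  induction l with
  | nil => rfl
  | cons x t ih =>
      have hx := h x List.mem_cons_self
      have : pvComb pvSent x = pvSent := by subst hx; simp [pvComb]
      calc pvBest (x :: t) = t.foldl pvComb (pvComb pvSent x) := rfl
        _ = t.foldl pvComb pvSent := by rw [this]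
        _ = pvSent := ih (fun y hy => h y (List.mem_cons_of_mem _ hy))

def pvGoodC (c : Int) (x : Int × List Int) : Prop :=
  x = pvSent ∨ (-1000000 < x.1 ∧ -1000000 < x.1 + c)

theorem pvAdj_sent {c : Int} : pvAdj c pvSent = pvSent := by
  simp [pvAdj, pvSent]

theorem pvGoodC_comb {c : Int} {a x : Int × List Int} (ha : pvGoodC c a) (hx : pvGoodC c x) :
    pvGoodC c (pvComb a x) := by
  unfold pvComb; split <;> assumption

theorem pvAdj_comb {c : Int} {a x : Int × List Int} (ha : pvGoodC c a) (hx : pvGoodC c x) :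
    pvComb (pvAdj c a) (pvAdj c x) = pvAdj c (pvComb a x) := by
  rcases ha with rfl | ⟨h1, h2⟩ <;> rcases hx with rfl | ⟨h3, h4⟩ <;>
    simp only [pvAdj, pvComb, pvSent] at * <;> split_ifs <;>
    first | rfl | omega

theorem pvAdj_fold {c : Int} {l : List (Int × List Int)} (h : ∀ x ∈ l, pvGoodC c x) :
    ∀ b : Int × List Int, pvGoodC c b →
    (l.map (pvAdj c)).foldl pvComb (pvAdj c b) = pvAdj c (l.foldl pvComb b) := by
  revert h
  induction l with
  | nil => intro _ b _; rfl
  | cons x t ih =>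
      intro h b hb
      have hx := h x List.mem_cons_self
      have ht : ∀ y ∈ t, pvGoodC c y := fun y hy => h y (List.mem_cons_of_mem _ hy)
      calc ((x :: t).map (pvAdj c)).foldl pvComb (pvAdj c b)
          = (t.map (pvAdj c)).foldl pvComb (pvComb (pvAdj c b) (pvAdj c x)) := rfl
        _ = (t.map (pvAdj c)).foldl pvComb (pvAdj c (pvComb b x)) := by rw [pvAdj_comb hb hx]
        _ = pvAdj c (t.foldl pvComb (pvComb b x)) := ih ht _ (pvGoodC_comb hb hx)
        _ = pvAdj c ((x :: t).foldl pvComb b) := rfl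

-- pvAdj distributes over pvBest when every element is the sentinel or stays above it after adjusting
theorem pvAdj_best {c : Int} {l : List (Int × List Int)}
    (h : ∀ x ∈ l, pvGoodC c x) :
    pvBest (l.map (pvAdj c)) = pvAdj c (pvBest l) := by
  unfold pvBest
  rw [← pvAdj_sent (c := c)]
  exact pvAdj_fold h _ (Or.inl rfl)

theorem pvDiff_bound {info : List Int} : ∀ (bs : List Bool) (s : Int), 0 ≤ s →
    s + (bs.length : Int) ≤ 11 →
    -(10 * (bs.length : Int)) ≤ pvDiff info s bs ∧ pvDiff info s bs ≤ 10 * (bs.length : Int) := by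
  intro bs
  induction bs with
  | nil => intro s _ _; simp [pvDiff]
  | cons b t ih =>
      intro s h1 h2
      simp only [List.length_cons] at h2 ⊢
      push_cast at h2 ⊢
      have ht := ih (s+1) (by omega) (by omega)
      unfold pvDiff
      split_ifs <;> omega

theorem pvInfo_nonneg {info : List Int} (h : ∀ x ∈ info, 0 ≤ x) (s : Int) :
    0 ≤ PySem.List.pyGetD info s 0 := by
  by_cases hr : PySem.Raise.InRange info.length s
  · exact h _ (PySem.List.pyGetD_mem info 0 hr)
  · rw [PySem.List.pyGetD_of_none info s 0 (by rwa [PySem.List.pyGet?_eq_none_iff])]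

theorem pvSum_set_ge (l : List Int) (i : Nat) (h : i < l.length) (v : Int) (hv : l[i] ≤ v) :
    l.sum ≤ (l.set i v).sum := by
  rw [List.sum_set]
  have hsplit : l.sum = (l.take i).sum + (l.drop i).sum := by
    rw [← List.sum_append, List.take_append_drop]
  rw [List.drop_eq_getElem_cons h, List.sum_cons] at hsplit
  rw [if_pos h]
  omega

-- one pySetD step of pvApply cannot decrease the total (info counts nonnegative)
theorem pvSet_step_ge {info : List Int} (hinfo : ∀ x ∈ info, 0 ≤ x) (ar : List Int)
    (s : Int) (hs : 0 ≤ s) :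
    ar.sum ≤ (PySem.List.pySetD ar s
      (PySem.List.pyGetD ar s 0 + PySem.List.pyGetD info s 0 + 1)).sum := by
  by_cases hr : PySem.Raise.InRange ar.length s
  · have hlt : s < (ar.length : Int) := by
      have := hr; unfold PySem.Raise.InRange at this; omega
    rw [PySem.List.pySetD_of_nonneg ar _ hs,
      PySem.List.pyGetD_eq_getElem ar 0 hs hlt]
    refine pvSum_set_ge ar s.toNat (by omega) _ ?_
    have := pvInfo_nonneg hinfo s
    omega
  · have : PySem.List.pySet? ar s
        (PySem.List.pyGetD ar s 0 + PySem.List.pyGetD info s 0 + 1) = none := by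
      rw [PySem.List.pySet?_eq_none_iff]; exact hr
    simp [PySem.List.pySetD, this]

-- with nonnegative info counts, adding arrows can only grow the total
theorem pvApply_sum_ge {info : List Int} (hinfo : ∀ x ∈ info, 0 ≤ x) :
    ∀ (bs : List Bool) (s : Int) (ar : List Int), 0 ≤ s →
    ar.sum ≤ (pvApply info s ar bs).sum := by
  intro bs
  induction bs with
  | nil => intro s ar _; exact le_refl _
  | cons b t ih =>
      intro s ar hs
      unfold pvApply
      refine le_trans ?_ (ih (s+1) _ (by omega))
      split
      · exact pvSet_step_ge hinfo ar s hs
      · exact le_refl _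

theorem pvVecs_len {k : Nat} : ∀ bs ∈ pvVecs k, bs.length = k := by
  induction k with
  | zero => intro bs h; simp [pvVecs] at h; simp [h]
  | succ k ih =>
      intro bs h
      simp only [pvVecs, List.mem_append, List.mem_map] at h
      rcases h with ⟨t, ht, rfl⟩ | ⟨t, ht, rfl⟩ <;> simp [ih t ht]

theorem pvVal_cases (n : Int) (info : List Int) (s : Int) (ar : List Int) (bs : List Bool) :
    pvVal n info s ar bs = pvSent ∨
    pvVal n info s ar bs = (pvDiff info s bs, pvApply info s ar bs) := by
  unfold pvVal; split
  · exact Or.inl rfl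
  · exact Or.inr rfl

theorem pvGoodC_foldl {c : Int} {l : List (Int × List Int)} :
    ∀ b : Int × List Int, (∀ x ∈ l, pvGoodC c x) → pvGoodC c b → pvGoodC c (l.foldl pvComb b) := by
  induction l with
  | nil => intro b _ hb; simpa using hb
  | cons x t ih =>
      intro b h hb
      exact ih _ (fun y hy => h y (List.mem_cons_of_mem _ hy))
        (pvGoodC_comb hb (h x List.mem_cons_self))

theorem pvGoodC_best {c : Int} {l : List (Int × List Int)} (h : ∀ x ∈ l, pvGoodC c x) :
    pvGoodC c (pvBest l) := pvGoodC_foldl _ h (Or.inl rfl)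

-- unfolding one choice position into A's per-level adjustment
theorem pvVal_cons_true (n : Int) (info : List Int) (s : Int) (ar : List Int) (bs : List Bool)
    (hd : pvDiff info (s+1) bs ≠ -1000000) :
    pvVal n info s ar (true :: bs) =
      pvAdj (10 - s) (pvVal n info (s+1)
        (PySem.List.pySetD ar s (PySem.List.pyGetD ar s 0 + PySem.List.pyGetD info s 0 + 1)) bs) := by
  unfold pvVal
  by_cases h : (pvApply info (s+1)
      (PySem.List.pySetD ar s (PySem.List.pyGetD ar s 0 + PySem.List.pyGetD info s 0 + 1)) bs).sum > n
  · rw [if_pos (show (pvApply info s ar (true :: bs)).sum > n from h), if_pos h]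
    simp [pvAdj, pvSent]
  · rw [if_neg (show ¬ (pvApply info s ar (true :: bs)).sum > n from h), if_neg h]
    unfold pvAdj
    rw [if_pos (by simpa using hd)]
    simp only [Prod.mk.injEq]
    refine ⟨?_, rfl⟩
    simp only [pvDiff, if_pos trivial]
    omega

theorem pvVal_cons_false (n : Int) (info : List Int) (s : Int) (ar : List Int) (bs : List Bool)
    (hd : pvDiff info (s+1) bs ≠ -1000000) :
    pvVal n info s ar (false :: bs) =
      pvAdj (if PySem.List.pyGetD info s 0 > 0 then -(10 - s) else 0)
        (pvVal n info (s+1) ar bs) := by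
  unfold pvVal
  by_cases h : (pvApply info (s+1) ar bs).sum > n
  · rw [if_pos (show (pvApply info s ar (false :: bs)).sum > n from h), if_pos h]
    simp [pvAdj, pvSent]
  · rw [if_neg (show ¬ (pvApply info s ar (false :: bs)).sum > n from h), if_neg h]
    unfold pvAdj
    rw [if_pos (by simpa using hd)]
    simp only [Prod.mk.injEq]
    refine ⟨?_, rfl⟩
    simp only [pvDiff, Bool.false_eq_true, if_false]
    split_ifs <;> omega

-- A's combine step written as pvComb of the two adjusted branch results
theorem pvA_comb (c1 c2 : Int) (r1 r2 : Int × List Int)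
    (g1 : pvGoodC c1 r1) (g2 : pvGoodC c2 r2) :
    (if (if r1.1 ≠ -1000000 then r1.1 + c1 else r1.1) = -1000000 ∧
        (if r2.1 ≠ -1000000 then r2.1 + c2 else r2.1) = -1000000 then pvSent
     else if (if r1.1 ≠ -1000000 then r1.1 + c1 else r1.1) >
         (if r2.1 ≠ -1000000 then r2.1 + c2 else r2.1) then
       ((if r1.1 ≠ -1000000 then r1.1 + c1 else r1.1), r1.2)
     else ((if r2.1 ≠ -1000000 then r2.1 + c2 else r2.1), r2.2)) =
    pvComb (pvAdj c2 r2) (pvAdj c1 r1) := by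
  rcases g1 with rfl | ⟨h1, h2⟩ <;> rcases g2 with rfl | ⟨h3, h4⟩ <;>
    simp only [pvAdj, pvComb, pvSent] at * <;> split_ifs <;>
    first
      | rfl
      | omega

theorem pvGood_adj {c : Int} {x : Int × List Int} (h : pvGoodC c x) : pvGood (pvAdj c x) := by
  rcases h with rfl | ⟨h1, h2⟩
  · rw [pvAdj_sent]; exact Or.inl rfl
  · right; unfold pvAdj; rw [if_pos (by omega)]; simpa using h2

-- ===== A equals pvBest over all choice vectors =====
theorem pvA_eq (n : Int) (info : List Int) (hinfo : ∀ x ∈ info, 0 ≤ x) :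
    ∀ (k : Nat) (score : Int) (ar : List Int), (11 - score).toNat = k → 0 ≤ score →
    solve4 n info ar score = pvBest ((pvVecs k).map (pvVal n info score ar)) := by
  intro k
  induction k with
  | zero =>
      intro score ar hk hs
      have h10 : score > 10 := by omega
      rw [solve4]
      by_cases hsum : ar.sum > n
      · rw [if_pos hsum]
        simp [pvVecs, pvBest, pvVal, pvApply, hsum, pvComb, pvSent]
      · rw [if_neg hsum, if_pos h10]
        simp only [pvVecs, List.map_cons, List.map_nil, pvBest, List.foldl]
        unfold pvVal
        rw [if_neg (by simpa [pvApply] using hsum)]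
        simp [pvComb, pvSent, pvDiff, pvApply]
  | succ k ih =>
      intro score ar hk hs
      have h10 : ¬ score > 10 := by omega
      have hsk : score + ((k : Int) + 1) = 11 := by omega
      by_cases hsum : ar.sum > n
      · rw [solve4, if_pos hsum]
        refine (pvBest_all_sent ?_).symm
        intro x hx
        simp only [List.mem_map] at hx
        obtain ⟨bs, _, rfl⟩ := hx
        unfold pvVal
        rw [if_pos (lt_of_lt_of_le hsum (pvApply_sum_ge hinfo bs score ar hs))]
      · -- the recursion level really branches
        have hsle : score ≤ 10 := by omega
        have hdiffb : ∀ bs ∈ pvVecs k,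
            -(10 * (k : Int)) ≤ pvDiff info (score+1) bs ∧
            pvDiff info (score+1) bs ≤ 10 * (k : Int) := by
          intro bs hbs
          have := pvDiff_bound (info := info) bs (score+1) (by omega)
            (by rw [pvVecs_len bs hbs]; omega)
          rw [pvVecs_len bs hbs] at this
          exact this
        have hkb : (k : Int) ≤ 11 := by omega
        have hgc : ∀ (c : Int), -11 ≤ c → c ≤ 11 → ∀ (AR : List Int),
            ∀ x ∈ (pvVecs k).map (pvVal n info (score+1) AR), pvGoodC c x := by
          intro c hcl hcr AR x hx
          simp only [List.mem_map] at hx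
          obtain ⟨bs, hbs, rfl⟩ := hx
          rcases pvVal_cases n info (score+1) AR bs with h | h
          · exact Or.inl h
          · rw [h]; right
            simp only []
            have := hdiffb bs hbs
            omega
        have hc1a : (-11 : Int) ≤ 10 - score := by omega
        have hc1b : (10 : Int) - score ≤ 11 := by omega
        have hc2a : (-11 : Int) ≤ (if PySem.List.pyGetD info score 0 > 0 then -(10 - score) else 0) := by
          split_ifs <;> omega
        have hc2b : (if PySem.List.pyGetD info score 0 > 0 then -(10 - score) else 0) ≤ (11 : Int) := by
          split_ifs <;> omega
        have hg1 : pvGoodC (10 - score)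
            (pvBest ((pvVecs k).map (pvVal n info (score+1)
              (PySem.List.pySetD ar score
                (PySem.List.pyGetD ar score 0 + PySem.List.pyGetD info score 0 + 1))))) :=
          pvGoodC_best (hgc _ hc1a hc1b _)
        have hg2 : pvGoodC (if PySem.List.pyGetD info score 0 > 0 then -(10 - score) else 0)
            (pvBest ((pvVecs k).map (pvVal n info (score+1) ar))) :=
          pvGoodC_best (hgc _ hc2a hc2b _)
        have hr1 : solve4 n info
            (PySem.List.pySetD ar score
              (PySem.List.pyGetD ar score 0 + PySem.List.pyGetD info score 0 + 1)) (score+1) =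
            pvBest ((pvVecs k).map (pvVal n info (score+1)
              (PySem.List.pySetD ar score
                (PySem.List.pyGetD ar score 0 + PySem.List.pyGetD info score 0 + 1)))) :=
          ih (score+1) _ (by omega) (by omega)
        have hr2 : solve4 n info ar (score+1) =
            pvBest ((pvVecs k).map (pvVal n info (score+1) ar)) :=
          ih (score+1) _ (by omega) (by omega)
        -- unfold one level of A into the let-free combine shape
        have hA : solve4 n info ar score =
            (if (if (solve4 n info
                    (PySem.List.pySetD ar score
                      (PySem.List.pyGetD ar score 0 + PySem.List.pyGetD info score 0 + 1))
                    (score+1)).1 ≠ -1000000 then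
                  (solve4 n info
                    (PySem.List.pySetD ar score
                      (PySem.List.pyGetD ar score 0 + PySem.List.pyGetD info score 0 + 1))
                    (score+1)).1 + (10 - score)
                else (solve4 n info
                    (PySem.List.pySetD ar score
                      (PySem.List.pyGetD ar score 0 + PySem.List.pyGetD info score 0 + 1))
                    (score+1)).1) = -1000000 ∧
                (if (solve4 n info ar (score+1)).1 ≠ -1000000 then
                  (solve4 n info ar (score+1)).1 +
                    (if PySem.List.pyGetD info score 0 > 0 then -(10 - score) else 0)
                else (solve4 n info ar (score+1)).1) = -1000000 then pvSent
             else if (if (solve4 n info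
                    (PySem.List.pySetD ar score
                      (PySem.List.pyGetD ar score 0 + PySem.List.pyGetD info score 0 + 1))
                    (score+1)).1 ≠ -1000000 then
                  (solve4 n info
                    (PySem.List.pySetD ar score
                      (PySem.List.pyGetD ar score 0 + PySem.List.pyGetD info score 0 + 1))
                    (score+1)).1 + (10 - score)
                else (solve4 n info
                    (PySem.List.pySetD ar score
                      (PySem.List.pyGetD ar score 0 + PySem.List.pyGetD info score 0 + 1))
                    (score+1)).1) >
                (if (solve4 n info ar (score+1)).1 ≠ -1000000 then
                  (solve4 n info ar (score+1)).1 +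
                    (if PySem.List.pyGetD info score 0 > 0 then -(10 - score) else 0)
                else (solve4 n info ar (score+1)).1) then
               ((if (solve4 n info
                    (PySem.List.pySetD ar score
                      (PySem.List.pyGetD ar score 0 + PySem.List.pyGetD info score 0 + 1))
                    (score+1)).1 ≠ -1000000 then
                  (solve4 n info
                    (PySem.List.pySetD ar score
                      (PySem.List.pyGetD ar score 0 + PySem.List.pyGetD info score 0 + 1))
                    (score+1)).1 + (10 - score)
                else (solve4 n info
                    (PySem.List.pySetD ar score
                      (PySem.List.pyGetD ar score 0 + PySem.List.pyGetD info score 0 + 1))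
                    (score+1)).1),
                (solve4 n info
                    (PySem.List.pySetD ar score
                      (PySem.List.pyGetD ar score 0 + PySem.List.pyGetD info score 0 + 1))
                    (score+1)).2)
             else ((if (solve4 n info ar (score+1)).1 ≠ -1000000 then
                  (solve4 n info ar (score+1)).1 +
                    (if PySem.List.pyGetD info score 0 > 0 then -(10 - score) else 0)
                else (solve4 n info ar (score+1)).1),
                (solve4 n info ar (score+1)).2)) := by
          rw [solve4, if_neg hsum, if_neg h10]
          by_cases hp : PySem.List.pyGetD info score 0 > 0 <;>
            simp [pvSent, hp, sub_eq_add_neg]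
        rw [hA, hr1, hr2,
          pvA_comb (10 - score) (if PySem.List.pyGetD info score 0 > 0 then -(10 - score) else 0)
            _ _ hg1 hg2]
        -- now the B side of the equation: split the vectors
        have hsplit : (pvVecs (k+1)).map (pvVal n info score ar) =
            (pvVecs k).map (fun bs => pvVal n info score ar (false :: bs)) ++
            (pvVecs k).map (fun bs => pvVal n info score ar (true :: bs)) := by
          simp only [pvVecs, List.map_append, List.map_map]
          rfl
        have hfalse : (pvVecs k).map (fun bs => pvVal n info score ar (false :: bs)) =
            ((pvVecs k).map (pvVal n info (score+1) ar)).map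
              (pvAdj (if PySem.List.pyGetD info score 0 > 0 then -(10 - score) else 0)) := by
          rw [List.map_map]
          apply List.map_congr_left
          intro bs hbs
          exact pvVal_cons_false n info score ar bs (by have := hdiffb bs hbs; omega)
        have htrue : (pvVecs k).map (fun bs => pvVal n info score ar (true :: bs)) =
            ((pvVecs k).map (pvVal n info (score+1)
              (PySem.List.pySetD ar score
                (PySem.List.pyGetD ar score 0 + PySem.List.pyGetD info score 0 + 1)))).map
              (pvAdj (10 - score)) := by
          rw [List.map_map]
          apply List.map_congr_left
          intro bs hbs
          exact pvVal_cons_true n info score ar bs (by have := hdiffb bs hbs; omega)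
        rw [hsplit, hfalse, htrue,
          pvBest_append
            (fun x hx => by
              simp only [List.mem_map] at hx
              obtain ⟨y, ⟨bs, hbs, rfl⟩, rfl⟩ := hx
              exact pvGood_adj (hgc _ hc2a hc2b ar _ (List.mem_map.mpr ⟨bs, hbs, rfl⟩)))
            (fun x hx => by
              simp only [List.mem_map] at hx
              obtain ⟨y, ⟨bs, hbs, rfl⟩, rfl⟩ := hx
              exact pvGood_adj (hgc _ hc1a hc1b _ _ (List.mem_map.mpr ⟨bs, hbs, rfl⟩))),
          pvAdj_best (hgc _ hc2a hc2b ar),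
          pvAdj_best (hgc _ hc1a hc1b _)]


-- bit extraction is stable under adding multiples of 2^t
theorem pvBits_zero (m : Int) : pvBits 0 m = [] := rfl

theorem pvBits_succ (K : Nat) (m : Int) :
    pvBits (K+1) m =
      (decide (PySem.Int.mod (PySem.Int.floordiv m (2 ^ K)) 2 = 1)) :: pvBits K m := rfl

theorem pvApply_cons (info : List Int) (s : Int) (ar : List Int) (b : Bool) (bs : List Bool) :
    pvApply info s ar (b :: bs) = pvApply info (s+1)
      (if b then PySem.List.pySetD ar s
        (PySem.List.pyGetD ar s 0 + PySem.List.pyGetD info s 0 + 1) else ar) bs := rfl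

theorem pvDiff_cons (info : List Int) (s : Int) (b : Bool) (bs : List Bool) :
    pvDiff info s (b :: bs) =
      (if b then 10 - s else if PySem.List.pyGetD info s 0 > 0 then -(10 - s) else 0) +
        pvDiff info (s+1) bs := rfl

theorem pvBits_shift : ∀ (t : Nat) (m c : Int), pvBits t (m + c * 2 ^ t) = pvBits t m := by
  intro t
  induction t with
  | zero => intro m c; rfl
  | succ t ih =>
      intro m c
      have hpow : (0 : Int) < 2 ^ t := by positivity
      have hre : m + c * 2 ^ (t+1) = m + (2 * c) * 2 ^ t := by ring
      rw [hre, pvBits_succ, pvBits_succ, ih]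
      congr 2
      rw [PySem.Int.floordiv_eq_ediv_of_pos hpow, PySem.Int.floordiv_eq_ediv_of_pos hpow,
        Int.add_mul_ediv_right _ _ (by omega : (2:Int) ^ t ≠ 0),
        PySem.Int.mod_eq_emod_of_pos (by omega), PySem.Int.mod_eq_emod_of_pos (by omega),
        Int.add_mul_emod_self_left]

-- the masks 0 .. 2^K-1, read msb-first, enumerate exactly the choice vectors in order
theorem pvBits_vecs : ∀ (K : Nat),
    (PySem.List.pyRange 0 ((2:Int) ^ K)).map (pvBits K) = pvVecs K := by
  intro K
  induction K with
  | zero => decide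
  | succ K ih =>
      have hp0 : (0 : Int) ≤ 2 ^ K := by positivity
      have hpp : (0 : Int) < 2 ^ K := by positivity
      have hle : (2 : Int) ^ K ≤ 2 ^ (K+1) := by rw [pow_succ]; nlinarith
      rw [PySem.List.pyRange_one_append 0 ((2:Int) ^ K) ((2:Int) ^ (K+1)) hp0 hle,
        List.map_append]
      have hlo : (PySem.List.pyRange 0 ((2:Int) ^ K)).map (pvBits (K+1)) =
          ((PySem.List.pyRange 0 ((2:Int) ^ K)).map (pvBits K)).map
            (fun bs => false :: bs) := by
        rw [List.map_map]
        apply List.map_congr_left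
        intro m hm
        rw [PySem.List.mem_pyRange_one] at hm
        show pvBits (K+1) m = false :: pvBits K m
        rw [pvBits_succ]
        congr 1
        rw [PySem.Int.floordiv_eq_ediv_of_pos hpp,
          Int.ediv_eq_zero_of_lt hm.1 hm.2,
          PySem.Int.mod_eq_emod_of_pos (by omega)]
        decide
      have hhi : (PySem.List.pyRange ((2:Int) ^ K) ((2:Int) ^ (K+1))).map (pvBits (K+1)) =
          ((PySem.List.pyRange 0 ((2:Int) ^ K)).map (pvBits K)).map
            (fun bs => true :: bs) := by
        have hshift : PySem.List.pyRange ((2:Int) ^ K) ((2:Int) ^ (K+1)) =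
            (PySem.List.pyRange 0 ((2:Int) ^ K)).map (fun x => x + 2 ^ K) := by
          rw [PySem.List.pyRange_one ((2:Int) ^ K) ((2:Int) ^ (K+1)),
            PySem.List.pyRange_one 0 ((2:Int) ^ K),
            show (2:Int) ^ (K+1) - 2 ^ K = 2 ^ K - 0 by rw [pow_succ]; ring,
            List.map_map]
          apply List.map_congr_left
          intro j _
          show (2:Int) ^ K + (j : Int) = 0 + (j : Int) + 2 ^ K
          ring
        rw [hshift, List.map_map, List.map_map]
        apply List.map_congr_left
        intro m hm
        rw [PySem.List.mem_pyRange_one] at hm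
        show pvBits (K+1) (m + 2 ^ K) = true :: pvBits K m
        rw [pvBits_succ]
        congr 1
        · rw [show m + (2:Int) ^ K = m + 1 * 2 ^ K by ring,
            PySem.Int.floordiv_eq_ediv_of_pos hpp,
            Int.add_mul_ediv_right _ _ (by omega : (2:Int) ^ K ≠ 0),
            Int.ediv_eq_zero_of_lt hm.1 hm.2,
            PySem.Int.mod_eq_emod_of_pos (by omega)]
          decide
        · rw [show m + (2:Int) ^ K = m + 1 * 2 ^ K by ring, pvBits_shift]
      rw [hlo, hhi, ih, pvVecs]

-- one inner pass of B computes exactly the candidate vector and the score difference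
theorem pvInner (info : List Int) (score m : Int) (K : Nat) :
    ∀ (t : Nat) (a : Int) (ar : List Int) (d : Int), 0 ≤ a → a + (t : Int) = (K : Int) →
    (PySem.List.pyRange a ((K : Nat) : Int)).foldl
      (fun cd j =>
        if PySem.Int.mod (PySem.Int.floordiv m (2 ^ (((K : Nat) : Int) - 1 - j).toNat)) 2 = 1 then
          (PySem.List.pySetD cd.1 (score + j)
            (PySem.List.pyGetD cd.1 (score + j) 0 + PySem.List.pyGetD info (score + j) 0 + 1),
           cd.2 + (10 - (score + j)))
        else if PySem.List.pyGetD info (score + j) 0 > 0 then (cd.1, cd.2 - (10 - (score + j)))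
        else cd) (ar, d)
    = (pvApply info (score + a) ar (pvBits t m), d + pvDiff info (score + a) (pvBits t m)) := by
  intro t
  induction t with
  | zero =>
      intro a ar d h0 hK
      rw [PySem.List.pyRange_one_eq_nil (by omega), pvBits_zero]
      show (ar, d) = _
      simp [pvApply, pvDiff]
  | succ t ih =>
      intro a ar d h0 hK
      rw [PySem.List.pyRange_one_cons (by omega : a < ((K : Nat) : Int)), List.foldl_cons]
      have hsh : ((((K : Nat) : Int)) - 1 - a).toNat = t := by omega
      rw [hsh, pvBits_succ, pvApply_cons, pvDiff_cons]
      have hscons : score + a + 1 = score + (a + 1) := by ring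
      by_cases hbit : PySem.Int.mod (PySem.Int.floordiv m (2 ^ t)) 2 = 1
      · rw [if_pos hbit]
        simp only [hbit, decide_true, if_true]
        rw [ih (a+1) _ _ (by omega) (by omega), hscons]
        exact Prod.ext rfl (by omega)
      · rw [if_neg hbit]
        simp only [hbit, decide_false, Bool.false_eq_true, if_false]
        by_cases hpos : PySem.List.pyGetD info (score + a) 0 > 0
        · rw [if_pos hpos, if_pos hpos, ih (a+1) _ _ (by omega) (by omega), hscons]
          exact Prod.ext rfl (by omega)
        · rw [if_neg hpos, if_neg hpos, ih (a+1) _ _ (by omega) (by omega), hscons]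
          exact Prod.ext rfl (by omega)

def pvRel (o : Option (Int × List Int)) (p : Int × List Int) : Prop :=
  (o = none ∧ p = pvSent) ∨ (o = some p ∧ -1000000 < p.1)

-- B's best-so-far loop tracks A's left-preferring maximum
theorem pvOuter (n : Int) (info : List Int) (score : Int) (ar : List Int) (hs : 0 ≤ score) :
    ∀ (l : List (List Bool)), (∀ bs ∈ l, score + (bs.length : Int) = 11) →
    ∀ (o : Option (Int × List Int)) (p : Int × List Int), pvRel o p →
    pvRel (l.foldl (fun best bs =>
        if (pvApply info score ar bs).sum ≤ n ∧
           (best = none ∨ pvDiff info score bs > (best.getD (0, ([] : List Int))).1)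
        then some (pvDiff info score bs, pvApply info score ar bs) else best) o)
      ((l.map (pvVal n info score ar)).foldl pvComb p) := by
  intro l
  induction l with
  | nil => intro _ o p h; exact h
  | cons bs t ih =>
      intro hlen o p h
      simp only [List.foldl_cons, List.map_cons]
      apply ih (fun y hy => hlen y (List.mem_cons_of_mem _ hy))
      have hl := hlen bs List.mem_cons_self
      have hdb := pvDiff_bound (info := info) bs score hs (by omega)
      by_cases hf : (pvApply info score ar bs).sum ≤ n
      · have hval : pvVal n info score ar bs =
            (pvDiff info score bs, pvApply info score ar bs) := by
          unfold pvVal; rw [if_neg (by omega)]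
        rcases h with ⟨rfl, rfl⟩ | ⟨rfl, hp⟩
        · rw [if_pos ⟨hf, Or.inl rfl⟩, hval, pvComb_sent_left (Or.inr (by simp; omega))]
          exact Or.inr ⟨rfl, by simp; omega⟩
        · by_cases hgt : pvDiff info score bs > p.1
          · rw [if_pos ⟨hf, Or.inr (by simpa using hgt)⟩, hval]
            have : pvComb p (pvDiff info score bs, pvApply info score ar bs) =
                (pvDiff info score bs, pvApply info score ar bs) := by
              unfold pvComb; rw [if_pos (by simpa using hgt)]
            rw [this]
            exact Or.inr ⟨rfl, by simp; omega⟩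
          · rw [if_neg (by
              rintro ⟨-, hc | hc⟩
              · exact Option.some_ne_none _ hc
              · simp at hc; omega), hval]
            have : pvComb p (pvDiff info score bs, pvApply info score ar bs) = p := by
              unfold pvComb; rw [if_neg (by simpa using hgt)]
            rw [this]
            exact Or.inr ⟨rfl, hp⟩
      · have hval : pvVal n info score ar bs = pvSent := by
          unfold pvVal; rw [if_pos (by omega)]
        rw [if_neg (by rintro ⟨hc, -⟩; exact hf hc), hval]
        rcases h with ⟨rfl, rfl⟩ | ⟨rfl, hp⟩
        · rw [pvComb_sent_right (Or.inl rfl)]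
          exact Or.inl ⟨rfl, rfl⟩
        · rw [pvComb_sent_right (Or.inr hp)]
          exact Or.inr ⟨rfl, hp⟩

-- ===== B equals pvBest over all choice vectors =====
theorem pvB_eq (n : Int) (info : List Int) :
    ∀ (K : Nat) (score : Int) (ar : List Int), (11 - score).toNat = K → 0 ≤ score →
    score ≤ 10 → ar.sum ≤ n →
    solve4_alt n info ar score = pvBest ((pvVecs K).map (pvVal n info score ar)) := by
  intro K score ar hk hs hsle hsum
  unfold solve4_alt
  rw [if_neg (by omega)]
  rw [if_pos (show score < 11 by omega)]
  rw [show (11 : Int) - score = ((K : Nat) : Int) by omega]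
  dsimp only
  simp only [Int.toNat_natCast]
  have hfun : ∀ (m : Int),
      ((PySem.List.pyRange 0 ((K : Nat) : Int)).foldl
        (fun cd j =>
          if PySem.Int.mod (PySem.Int.floordiv m (2 ^ (((K : Nat) : Int) - 1 - j).toNat)) 2 = 1 then
            (PySem.List.pySetD cd.1 (score + j)
              (PySem.List.pyGetD cd.1 (score + j) 0 + PySem.List.pyGetD info (score + j) 0 + 1),
             cd.2 + (10 - (score + j)))
          else if PySem.List.pyGetD info (score + j) 0 > 0 then (cd.1, cd.2 - (10 - (score + j)))
          else cd) (ar, (0 : Int))) = (pvApply info score ar (pvBits K m),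
            pvDiff info score (pvBits K m)) := by
    intro m
    rw [pvInner info score m K K 0 ar 0 le_rfl (by omega)]
    simp
  simp only [hfun]
  have hlens : ∀ bs ∈ pvVecs K, score + (bs.length : Int) = 11 := by
    intro bs hbs; rw [pvVecs_len bs hbs]; omega
  have key := pvOuter n info score ar hs (pvVecs K) hlens none pvSent (Or.inl ⟨rfl, rfl⟩)
  have hfold : (PySem.List.pyRange 0 ((2:Int) ^ K)).foldl
      (fun (best : Option (Int × List Int)) (m : Int) =>
        if (pvApply info score ar (pvBits K m)).sum ≤ n ∧
           (best = none ∨ pvDiff info score (pvBits K m) > (best.getD (0, ([] : List Int))).1)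
        then some (pvDiff info score (pvBits K m), pvApply info score ar (pvBits K m)) else best)
      none
      = (pvVecs K).foldl
      (fun (best : Option (Int × List Int)) bs =>
        if (pvApply info score ar bs).sum ≤ n ∧
           (best = none ∨ pvDiff info score bs > (best.getD (0, ([] : List Int))).1)
        then some (pvDiff info score bs, pvApply info score ar bs) else best)
      none := by
    rw [← pvBits_vecs K, List.foldl_map]
  rw [hfold]
  rcases key with ⟨ho, hp⟩ | ⟨ho, hp⟩
  · rw [ho, show ((pvVecs K).map (pvVal n info score ar)).foldl pvComb pvSent
        = pvBest ((pvVecs K).map (pvVal n info score ar)) from rfl] at *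
    rw [hp]
    rfl
  · rw [ho]
    rfl

-- ===== VERDICT (by name: the statement is the Claim_ definition above) =====
theorem solve4_spec : Claim_equal_solve4 := by
  intro n info arrow score _ hpre
  unfold Spec_solve4
  by_cases hsum : arrow.sum > n
  · rw [solve4, if_pos hsum]
    unfold solve4_alt
    rw [if_pos hsum]
  · by_cases h10 : score > 10
    · rw [solve4, if_neg hsum, if_pos h10]
      unfold solve4_alt
      rw [if_neg hsum, if_neg (by omega : ¬ score < 11)]
      dsimp only
      rw [show PySem.List.pyRange (0:Int) ((2:Int) ^ ((0:Int).toNat)) = [0] from by decide,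
        show PySem.List.pyRange (0:Int) (0:Int) = [] from by decide]
      simp only [List.foldl_cons, List.foldl_nil]
      rw [if_pos ⟨by omega, Or.inl trivial⟩]
    · rcases hpre with h | h | ⟨hs0, hlinfo, hlarrow, hinfo⟩
      · omega
      · omega
      · rw [pvA_eq n info hinfo ((11 - score).toNat) score arrow rfl hs0,
          pvB_eq n info ((11 - score).toNat) score arrow rfl hs0 (by omega) (by omega)]
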